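-- pv_equiv track=rewrite | github.com/andrewprzh/ngs-analysis | ptbseq/preprocessing/unite_and_filter_guides.py | merge_barcodes
-- ===== SOURCE A (Python) =====
-- from collections import defaultdict
--
-- def merge_barcodes(barcode2guide1, barcode2guide2):
--     result = defaultdict(set)
--     for bc in barcode2guide1:
--         if bc in barcode2guide2:
--             result[bc].update(barcode2guide1[bc].intersection(barcode2guide2[bc]))
--         else:
--             result[bc].update(barcode2guide1[bc])
--     for bc in barcode2guide2:
--         if bc not in barcode2guide1:
--             result[bc].update(barcode2guide2[bc])
--     return result
-- ===== SOURCE B (Python) =====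
-- from collections import defaultdict, Counter
--
-- def merge_barcodes(barcode2guide1, barcode2guide2):
--     # Voting: a guide survives for a barcode iff it got a vote from every
--     # input dict that contains that barcode (2 if shared, 1 otherwise).
--     copies = Counter()
--     votes = defaultdict(Counter)
--     for d in (barcode2guide1, barcode2guide2):
--         for bc, guides in d.items():
--             copies[bc] += 1
--             for g in guides:
--                 votes[bc][g] += 1
--     result = defaultdict(set)
--     for bc, need in copies.items():
--         result[bc] = {g for g, c in votes[bc].items() if c == need}
--     return result
-- ===== Notes on version B (the rewrite author's own statement) =====
-- stated objective: alternative
-- what changed: B replaces A's set intersections with cross-dict membership tests by a voting scheme: one pass counts how many input dicts contain each barcode and tallies per-(barcode,guide) votes in a Counter, then a guide is kept iff its vote count equals the number of dicts containing its barcode; no intersection or membership test between the two dicts occurs.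
import Mathlib
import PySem

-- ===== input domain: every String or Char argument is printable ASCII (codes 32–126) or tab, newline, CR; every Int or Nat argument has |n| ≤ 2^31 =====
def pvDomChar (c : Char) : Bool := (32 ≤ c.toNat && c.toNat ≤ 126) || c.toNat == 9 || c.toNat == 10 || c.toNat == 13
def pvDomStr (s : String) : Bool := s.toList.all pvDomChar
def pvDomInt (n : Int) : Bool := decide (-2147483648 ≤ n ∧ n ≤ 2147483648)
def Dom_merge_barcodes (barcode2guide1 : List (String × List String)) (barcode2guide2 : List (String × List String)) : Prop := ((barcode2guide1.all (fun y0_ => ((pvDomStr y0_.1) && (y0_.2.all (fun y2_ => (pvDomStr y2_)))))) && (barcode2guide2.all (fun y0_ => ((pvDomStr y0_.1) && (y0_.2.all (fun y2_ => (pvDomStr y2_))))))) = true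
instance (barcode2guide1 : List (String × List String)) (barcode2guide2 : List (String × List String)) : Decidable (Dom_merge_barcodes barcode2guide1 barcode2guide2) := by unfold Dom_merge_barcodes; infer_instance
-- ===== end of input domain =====

-- B replaces A's per-key set intersections / cross-dict membership tests by a voting scheme
-- (count dict-copies per barcode and votes per (barcode, guide); keep a guide iff votes = copies);
-- objective: a genuinely different algorithm of the same cost.

-- ===== PORT A =====
-- A's two loops over the dicts' keys; result is a defaultdict(set): result[bc].update(X) is
-- modify bc [] (fun s => Set.update s X).  dict arguments: Dict.ofList; set values: Set.ofList.
def merge_barcodes (barcode2guide1 : List (String × List String)) (barcode2guide2 : List (String × List String)) : List (String × List String) :=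
  let d1 : PySem.Dict String (List String) :=
    PySem.Dict.ofList (barcode2guide1.map (fun p => (p.1, PySem.Set.ofList p.2)))
  let d2 : PySem.Dict String (List String) :=
    PySem.Dict.ofList (barcode2guide2.map (fun p => (p.1, PySem.Set.ofList p.2)))
  let r1 : PySem.Dict String (List String) :=
    d1.keys.foldl (fun r bc =>
      if d2.contains bc then
        r.modify bc [] (fun s => PySem.Set.update s (PySem.Set.inter (d1.getD bc []) (d2.getD bc [])))
      else
        r.modify bc [] (fun s => PySem.Set.update s (d1.getD bc []))) PySem.Dict.empty
  let r2 : PySem.Dict String (List String) :=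
    d2.keys.foldl (fun r bc =>
      if !(d1.contains bc) then
        r.modify bc [] (fun s => PySem.Set.update s (d2.getD bc []))
      else r) r1
  r2.items

-- ===== PORT B =====
-- B: one pass over both dicts tallies copies[bc] (how many dicts contain bc) and
-- votes[bc][g] (Counter of guide votes); then result[bc] = {g | votes[bc][g] == copies[bc]}.
def merge_barcodes_alt (barcode2guide1 : List (String × List String)) (barcode2guide2 : List (String × List String)) : List (String × List String) :=
  let d1 : PySem.Dict String (List String) :=
    PySem.Dict.ofList (barcode2guide1.map (fun p => (p.1, PySem.Set.ofList p.2)))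
  let d2 : PySem.Dict String (List String) :=
    PySem.Dict.ofList (barcode2guide2.map (fun p => (p.1, PySem.Set.ofList p.2)))
  let st : PySem.Dict String Int × PySem.Dict String (PySem.Dict String Int) :=
    (d1.items ++ d2.items).foldl
      (fun st p =>
        (st.1.modify p.1 0 (· + 1),
         st.2.modify p.1 PySem.Dict.empty (fun c => p.2.foldl (fun c g => c.modify g 0 (· + 1)) c)))
      (PySem.Dict.empty, PySem.Dict.empty)
  st.1.items.map (fun q =>
    (q.1, ((st.2.getD q.1 PySem.Dict.empty).items.filter (fun e => e.2 == q.2)).map (·.1)))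

-- ===== PRECONDITION & SPEC =====
def Spec_merge_barcodes (barcode2guide1 : List (String × List String)) (barcode2guide2 : List (String × List String)) (out : List (String × List String)) : Prop := out = merge_barcodes_alt barcode2guide1 barcode2guide2
instance (barcode2guide1 : List (String × List String)) (barcode2guide2 : List (String × List String)) (out : List (String × List String)) : Decidable (Spec_merge_barcodes barcode2guide1 barcode2guide2 out) := by unfold Spec_merge_barcodes; infer_instance

-- ===== CLAIM (what is proved, stated in full; the proofs are below) =====
def Claim_equal_merge_barcodes : Prop := ∀ (barcode2guide1 : List (String × List String)) (barcode2guide2 : List (String × List String)), Dom_merge_barcodes barcode2guide1 barcode2guide2 → Spec_merge_barcodes barcode2guide1 barcode2guide2 (merge_barcodes barcode2guide1 barcode2guide2)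

-- ===== LEMMAS AND PROOFS =====

-- A's first loop: modify on fresh distinct keys appends (k, F p []).
lemma pv_aloop1 (F : String × List String → List String → List String) :
    ∀ (l : List (String × List String)) (r : PySem.Dict String (List String)),
      (l.map (·.1)).Nodup → (∀ p ∈ l, r.contains p.1 = false) →
      (l.foldl (fun r p => r.modify p.1 [] (F p)) r).items
        = r.items ++ l.map (fun p => (p.1, F p [])) := by
  intro l
  induction l with
  | nil => intro r _ _; simp
  | cons p t ih =>
    intro r hnd hfresh
    rw [List.map_cons, List.nodup_cons] at hnd
    obtain ⟨hhd, htl⟩ := hnd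
    have hp : r.contains p.1 = false := hfresh p (by simp)
    have hmod : r.modify p.1 [] (F p) = r.insert p.1 (F p []) := by
      show r.insert p.1 (F p (r.getD p.1 [])) = _
      simp [PySem.Dict.getD_of_not_contains, hp]
    simp only [List.foldl_cons, hmod]
    rw [ih (r.insert p.1 (F p []))]
    · simp [PySem.Dict.items_insert_of_not_contains, hp]
    · exact htl
    · intro q hq
      have hne : q.1 ≠ p.1 := by
        intro h; exact hhd (h ▸ List.mem_map_of_mem hq)
      simp [PySem.Dict.contains_insert, hne, hfresh q (List.mem_cons_of_mem _ hq)]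

-- A's second loop: guarded modify on fresh distinct keys appends the guarded entries.
lemma pv_aloop2 (cond : String × List String → Bool)
    (F : String × List String → List String → List String) :
    ∀ (l : List (String × List String)) (r : PySem.Dict String (List String)),
      (l.map (·.1)).Nodup → (∀ p ∈ l, cond p = true → r.contains p.1 = false) →
      (l.foldl (fun r p => if cond p then r.modify p.1 [] (F p) else r) r).items
        = r.items ++ (l.filter cond).map (fun p => (p.1, F p [])) := by
  intro l
  induction l with
  | nil => intro r _ _; simp
  | cons p t ih =>
    intro r hnd hfresh
    rw [List.map_cons, List.nodup_cons] at hnd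
    obtain ⟨hhd, htl⟩ := hnd
    by_cases hc : cond p = true
    · have hp : r.contains p.1 = false := hfresh p (by simp) hc
      have hmod : r.modify p.1 [] (F p) = r.insert p.1 (F p []) := by
        show r.insert p.1 (F p (r.getD p.1 [])) = _
        simp [PySem.Dict.getD_of_not_contains, hp]
      simp only [List.foldl_cons, hc, if_pos, hmod]
      rw [ih (r.insert p.1 (F p [])) htl]
      · simp [PySem.Dict.items_insert_of_not_contains, hp, hc]
      · intro q hq hq2
        have hne : q.1 ≠ p.1 := fun h => hhd (h ▸ List.mem_map_of_mem hq)
        simp [PySem.Dict.contains_insert, hne, hfresh q (List.mem_cons_of_mem _ hq) hq2]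
    · simp only [List.foldl_cons, hc, if_neg, Bool.false_eq_true, not_false_iff]
      rw [ih r htl (fun q hq => hfresh q (List.mem_cons_of_mem _ hq))]
      simp [hc]

-- every value of a dict built from Set.ofList values is Nodup
lemma pv_vals_nodup :
    ∀ (l : List (String × List String)) (d : PySem.Dict String (List String)),
      (∀ w ∈ d.values, w.Nodup) →
      ∀ w ∈ ((l.map (fun q => (q.1, PySem.Set.ofList q.2))).foldl
              (fun d p => d.insert p.1 p.2) d).values, w.Nodup := by
  intro l
  induction l with
  | nil => intro d h; exact h
  | cons q t ih =>
    intro d h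
    simp only [List.map_cons, List.foldl_cons]
    refine ih _ (fun w hw => ?_)
    rcases PySem.Dict.mem_values_insert _ _ _ _ hw with h1 | h2
    · exact h1 ▸ PySem.Set.nodup_ofList _
    · exact h w h2

-- Set.update on Nodup lists is append-filter.
lemma pv_update_nodup :
    ∀ (ys xs : List String), ys.Nodup →
      PySem.Set.update xs ys = xs ++ ys.filter (fun y => !(xs.contains y)) := by
  intro ys
  induction ys with
  | nil => intro xs _; simp [PySem.Set.update]
  | cons y t ih =>
    intro xs hnd
    rw [List.nodup_cons] at hnd
    obtain ⟨hy, ht⟩ := hnd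
    show PySem.Set.update (PySem.Set.add xs y) t = _
    by_cases hc : xs.contains y = true
    · have hym : y ∈ xs := by simpa using hc
      rw [show PySem.Set.add xs y = xs by simp [PySem.Set.add, hym], ih xs ht]
      simp [List.filter_cons, hym]
    · have hcf : xs.contains y = false := by simpa using hc
      have hym : y ∉ xs := by simpa using hcf
      rw [show PySem.Set.add xs y = xs ++ [y] by simp [PySem.Set.add, hym], ih _ ht]
      have : t.filter (fun z => !((xs ++ [y]).contains z))
           = t.filter (fun z => !(xs.contains z)) := by
        refine List.filter_congr (fun z hz => ?_)
        have : z ≠ y := fun h => hy (h ▸ hz)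
        simp [List.contains_append, this]
      rw [this]
      simp [List.filter_cons, hym]

-- getD of B's votes loop only sees the entries with the matching barcode.
lemma pv_votes_getD :
    ∀ (l : List (String × List String)) (d : PySem.Dict String (PySem.Dict String Int)) (c : String),
      (l.foldl (fun d p => d.modify p.1 PySem.Dict.empty
          (fun c => p.2.foldl (fun c g => c.modify g 0 (· + 1)) c)) d).getD c PySem.Dict.empty
        = (l.filter (fun p => p.1 == c)).foldl
            (fun acc p => p.2.foldl (fun c g => c.modify g 0 (· + 1)) acc) (d.getD c PySem.Dict.empty) := by
  intro l
  induction l with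
  | nil => intro d c; simp
  | cons p t ih =>
    intro d c
    simp only [List.foldl_cons, List.filter_cons]
    by_cases h : p.1 = c
    · simp only [h, BEq.rfl, if_pos, List.foldl_cons]
      rw [ih, PySem.Dict.getD_modify]
      simp [h]
    · have hb : (p.1 == c) = false := by simp [h]
      simp only [hb, Bool.false_eq_true, if_neg, not_false_iff]
      rw [ih, PySem.Dict.getD_modify, if_neg (fun hh => h hh.symm)]

-- a dict entry reachable from contains
lemma pv_mem_items_of_contains {ν : Type} (d : PySem.Dict String ν) (k : String) (dflt : ν)
    (h : d.contains k = true) : (k, d.getD k dflt) ∈ d.items := by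
  have h1 : (d.get? k).isSome := by rw [← PySem.Dict.contains_eq_isSome_get?, h]
  obtain ⟨v, hv⟩ := Option.isSome_iff_exists.mp h1
  have hm := PySem.Dict.mem_items_of_get?_eq_some _ hv
  rw [PySem.Dict.getD_of_get?_eq_some _ dflt hv]
  exact hm

-- the survivors of a one-dict counter (need = 1) are the guides themselves
lemma pv_counter_one (v : List String) (hv : v.Nodup) :
    ((PySem.Dict.counter v).items.filter (fun e => e.2 == (1 : Int))).map (·.1) = v := by
  rw [PySem.Dict.items_counter v, PySem.Set.ofList_eq_self_of_nodup _ hv, List.filter_map,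
      List.map_map]
  have h1 : v.filter ((fun e : String × Int => e.2 == (1 : Int)) ∘ (fun k => (k, (v.count k : Int)))) = v := by
    refine List.filter_eq_self.mpr (fun a ha => ?_)
    simp [List.count_eq_one_of_mem hv ha]
  rw [h1, show ((fun x : String × Int => x.1) ∘ fun k => (k, (v.count k : Int))) = id from rfl,
      List.map_id]

-- the survivors of a two-dict counter (need = 2) are exactly the intersection
lemma pv_counter_two (v1 v2 : List String) (h1 : v1.Nodup) (h2 : v2.Nodup) :
    ((PySem.Dict.counter (v1 ++ v2)).items.filter (fun e => e.2 == (2 : Int))).map (·.1)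
      = PySem.Set.inter v1 v2 := by
  have hS : PySem.Set.ofList (v1 ++ v2) = v1 ++ v2.filter (fun g => !(v1.contains g)) := by
    rw [PySem.Set.ofList_eq_foldl, List.foldl_append, ← PySem.Set.ofList_eq_foldl,
        PySem.Set.ofList_eq_self_of_nodup _ h1]
    exact pv_update_nodup v2 v1 h2
  rw [PySem.Dict.items_counter, hS, List.filter_map, List.map_map, List.filter_append]
  have hq2 : (v2.filter (fun g => !(v1.contains g))).filter
      ((fun e : String × Int => e.2 == (2 : Int)) ∘ (fun k => (k, ((v1 ++ v2).count k : Int)))) = [] := by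
    refine List.filter_eq_nil_iff.mpr (fun g hg => ?_)
    have hg2 : g ∈ v2 := (List.mem_filter.mp hg).1
    have hg1 : g ∉ v1 := by
      have := (List.mem_filter.mp hg).2
      simpa using this
    have hc : (v1 ++ v2).count g = 1 := by
      rw [List.count_append, List.count_eq_zero_of_not_mem hg1, List.count_eq_one_of_mem h2 hg2]
    simp [Function.comp, hc]
  have hq1 : v1.filter
      ((fun e : String × Int => e.2 == (2 : Int)) ∘ (fun k => (k, ((v1 ++ v2).count k : Int))))
      = v1.filter (fun g => v2.contains g) := by
    refine List.filter_congr (fun g hg => ?_)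
    have hcg : v1.count g = 1 := List.count_eq_one_of_mem h1 hg
    by_cases hm : g ∈ v2
    · have : (v1 ++ v2).count g = 2 := by
        rw [List.count_append, hcg, List.count_eq_one_of_mem h2 hm]
      simp [Function.comp, this, hm]
    · have : (v1 ++ v2).count g = 1 := by
        rw [List.count_append, hcg, List.count_eq_zero_of_not_mem hm]
      simp [Function.comp, this, hm]
  rw [hq1, hq2, List.append_nil,
      show ((fun x : String × Int => x.1) ∘ fun k => (k, ((v1 ++ v2).count k : Int))) = id from rfl,
      List.map_id]
  simp [PySem.Set.inter]

-- filter on the unique matching key of a Nodup-key pair list.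
lemma pv_filter_key_nodup {ν : Type} :
    ∀ (xs : List (String × ν)) (k : String) (v : ν),
      (xs.map (·.1)).Nodup → (k, v) ∈ xs →
      xs.filter (fun p => p.1 == k) = [(k, v)] := by
  intro xs
  induction xs with
  | nil => intro k v _ h; simp at h
  | cons q t ih =>
    intro k v hnd hm
    rw [List.map_cons, List.nodup_cons] at hnd
    obtain ⟨hhd, htl⟩ := hnd
    rcases List.mem_cons.mp hm with h | h
    · subst h
      simp only [List.filter_cons, BEq.rfl, if_pos]
      have : t.filter (fun p => p.1 == k) = [] := by
        refine List.filter_eq_nil_iff.mpr (fun p hp => ?_)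
        have : p.1 ≠ k := fun hh => hhd (hh ▸ List.mem_map.mpr ⟨p, hp, rfl⟩)
        simp [this]
      simp [this]
    · have hk : k ∈ t.map (·.1) := List.mem_map_of_mem h (f := (·.1))
      have : (q.1 == k) = false := by
        simp only [beq_eq_false_iff_ne, ne_eq]
        exact fun hh => hhd (hh ▸ hk)
      simp only [List.filter_cons, this, Bool.false_eq_true, if_neg, not_false_iff]
      exact ih k v htl h

-- no matching key: filter is empty.
lemma pv_filter_key_none {ν : Type} (xs : List (String × ν)) (k : String)
    (h : k ∉ xs.map (·.1)) : xs.filter (fun p => p.1 == k) = [] := by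
  refine List.filter_eq_nil_iff.mpr (fun p hp => ?_)
  have : p.1 ≠ k := fun hh => h (hh ▸ List.mem_map.mpr ⟨p, hp, rfl⟩)
  simp [this]

-- ===== VERDICT (by name: the statement is the Claim_ definition above) =====
theorem merge_barcodes_spec : Claim_equal_merge_barcodes := by
  intro b1 b2 _
  unfold Spec_merge_barcodes merge_barcodes merge_barcodes_alt
  dsimp only
  set e : String × List String → String × List String :=
    fun q => (q.1, PySem.Set.ofList q.2) with he
  set d1 : PySem.Dict String (List String) := PySem.Dict.ofList (b1.map e) with hd1
  set d2 : PySem.Dict String (List String) := PySem.Dict.ofList (b2.map e) with hd2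
  have hnd1 : d1.keys.Nodup := PySem.Dict.nodup_keys_ofList _
  have hnd2 : d2.keys.Nodup := PySem.Dict.nodup_keys_ofList _
  have hnd1' : (d1.items.map (·.1)).Nodup := hnd1
  have hnd2' : (d2.items.map (·.1)).Nodup := hnd2
  have hval1 : ∀ p ∈ d1.items, List.Nodup p.2 := by
    intro p hp
    have hmem : p.2 ∈ d1.values := by
      rw [show d1.values = d1.items.map (·.2) from rfl]
      exact List.mem_map_of_mem hp
    exact pv_vals_nodup b1 PySem.Dict.empty (fun w hw => absurd hw (List.not_mem_nil)) p.2 hmem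
  have hval2 : ∀ p ∈ d2.items, List.Nodup p.2 := by
    intro p hp
    have hmem : p.2 ∈ d2.values := by
      rw [show d2.values = d2.items.map (·.2) from rfl]
      exact List.mem_map_of_mem hp
    exact pv_vals_nodup b2 PySem.Dict.empty (fun w hw => absurd hw (List.not_mem_nil)) p.2 hmem
  -- ===== A side: reduce to an append of two maps =====
  rw [show d1.keys = d1.items.map (·.1) from rfl, show d2.keys = d2.items.map (·.1) from rfl,
      List.foldl_map, List.foldl_map]
  set FA : String × List String → List String → List String :=
    fun p s => if d2.contains p.1 then
        PySem.Set.update s (PySem.Set.inter (d1.getD p.1 []) (d2.getD p.1 []))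
      else PySem.Set.update s (d1.getD p.1 []) with hFA
  have hfun1 : (fun (r : PySem.Dict String (List String)) (p : String × List String) =>
      if d2.contains p.1 then
        r.modify p.1 [] (fun s => PySem.Set.update s (PySem.Set.inter (d1.getD p.1 []) (d2.getD p.1 [])))
      else
        r.modify p.1 [] (fun s => PySem.Set.update s (d1.getD p.1 [])))
      = fun r p => r.modify p.1 [] (FA p) := by
    funext r p
    by_cases h : d2.contains p.1 = true <;> simp [hFA, h]
  rw [hfun1]
  set A1 : PySem.Dict String (List String) :=
    d1.items.foldl (fun r p => r.modify p.1 [] (FA p)) PySem.Dict.empty with hA1def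
  have hA1 : A1.items = d1.items.map (fun p => (p.1, FA p [])) := by
    rw [hA1def, pv_aloop1 FA d1.items PySem.Dict.empty hnd1' (by intro p _; simp)]
    rw [show (PySem.Dict.empty : PySem.Dict String (List String)).items = [] from rfl, List.nil_append]
  have hA1keys : A1.keys = d1.keys := by
    rw [show A1.keys = A1.items.map (·.1) from rfl, hA1, List.map_map]
    rfl
  have hA1contains : ∀ k, A1.contains k = d1.contains k := by
    intro k
    rw [PySem.Dict.contains_eq_decide_mem_keys, PySem.Dict.contains_eq_decide_mem_keys, hA1keys]
  rw [pv_aloop2 (fun p => !(d1.contains p.1))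
        (fun p s => PySem.Set.update s (d2.getD p.1 [])) d2.items A1 hnd2'
        (by intro p _ hcond
            rw [hA1contains p.1]
            simpa using hcond),
      hA1]
  -- ===== B side: split the paired fold, reduce copies to a counter =====
  rw [PySem.List.foldl_prod_mk
        (f := fun (d : PySem.Dict String Int) (p : String × List String) => d.modify p.1 0 (· + 1))
        (g := fun (d : PySem.Dict String (PySem.Dict String Int)) (p : String × List String) =>
          d.modify p.1 PySem.Dict.empty (fun c => p.2.foldl (fun c g => c.modify g 0 (· + 1)) c))]
  set cop : PySem.Dict String Int :=
    (d1.items ++ d2.items).foldl (fun d p => d.modify p.1 0 (· + 1)) PySem.Dict.empty with hcopdef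
  set vot : PySem.Dict String (PySem.Dict String Int) :=
    (d1.items ++ d2.items).foldl (fun d p => d.modify p.1 PySem.Dict.empty
      (fun c => p.2.foldl (fun c g => c.modify g 0 (· + 1)) c)) PySem.Dict.empty with hvotdef
  dsimp only
  have hcop : cop = PySem.Dict.counter (d1.keys ++ d2.keys) := by
    rw [hcopdef, PySem.Dict.counter_eq_foldl,
        show d1.keys ++ d2.keys = (d1.items ++ d2.items).map (·.1) by
          rw [List.map_append]; rfl,
        List.foldl_map]
  have hcopitems : cop.items
      = (d1.keys ++ d2.keys.filter (fun k => !(d1.keys.contains k))).map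
          (fun k => (k, ((d1.keys ++ d2.keys).count k : Int))) := by
    rw [hcop, PySem.Dict.items_counter]
    congr 1
    rw [PySem.Set.ofList_eq_foldl, List.foldl_append, ← PySem.Set.ofList_eq_foldl,
        PySem.Set.ofList_eq_self_of_nodup _ hnd1]
    exact pv_update_nodup d2.keys d1.keys hnd2
  have hvot : ∀ k, vot.getD k PySem.Dict.empty
      = (d1.items.filter (fun p => p.1 == k) ++ d2.items.filter (fun p => p.1 == k)).foldl
          (fun acc p => p.2.foldl (fun c g => c.modify g 0 (· + 1)) acc) PySem.Dict.empty := by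
    intro k
    rw [hvotdef, pv_votes_getD, List.filter_append, PySem.Dict.getD_empty]
  rw [hcopitems, List.map_map, List.map_append]
  -- align the d2-only filters
  have hcont : ∀ k, (d1.keys.contains k) = d1.contains k := by
    intro k
    rw [PySem.Dict.contains_eq_decide_mem_keys d1 k]
    simp
  -- rewrite the A-side pieces over keys
  rw [PySem.Dict.items_eq_map_keys d1 hnd1 [], List.map_map,
      PySem.Dict.items_eq_map_keys d2 hnd2 [], List.filter_map, List.map_map]
  have hfilt : d2.keys.filter ((fun p : String × List String => !(d1.contains p.1)) ∘
        (fun k => (k, d2.getD k [])))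
      = d2.keys.filter (fun k => !(d1.keys.contains k)) := by
    refine List.filter_congr (fun k _ => ?_)
    simp [Function.comp, PySem.Dict.contains_eq_decide_mem_keys d1 k]
  rw [hfilt]
  congr 1
  -- ===== first part: barcodes of dict1 =====
  · refine List.map_congr_left (fun k hk => ?_)
    have hc1 : d1.contains k = true := by
      rw [PySem.Dict.contains_eq_decide_mem_keys d1 k]
      simp [hk]
    have hm1 : (k, d1.getD k []) ∈ d1.items := pv_mem_items_of_contains d1 k [] hc1
    have hv1 : (d1.getD k []).Nodup := hval1 _ hm1
    have hf1 : d1.items.filter (fun p => p.1 == k) = [(k, d1.getD k [])] :=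
      pv_filter_key_nodup d1.items k (d1.getD k []) hnd1' hm1
    by_cases hc2 : d2.contains k = true
    · have hm2 : (k, d2.getD k []) ∈ d2.items := pv_mem_items_of_contains d2 k [] hc2
      have hv2 : (d2.getD k []).Nodup := hval2 _ hm2
      have hf2 : d2.items.filter (fun p => p.1 == k) = [(k, d2.getD k [])] :=
        pv_filter_key_nodup d2.items k (d2.getD k []) hnd2' hm2
      have hk2 : k ∈ d2.keys := (PySem.Dict.contains_iff_mem_keys d2 k).mp hc2
      have hvk : vot.getD k PySem.Dict.empty
          = PySem.Dict.counter (d1.getD k [] ++ d2.getD k []) := by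
        rw [hvot k, hf1, hf2, PySem.Dict.counter_eq_foldl, List.foldl_append]
        simp
      have hneed : (((d1.keys ++ d2.keys).count k : Nat) : Int) = 2 := by
        rw [List.count_append, List.count_eq_one_of_mem hnd1 hk, List.count_eq_one_of_mem hnd2 hk2]
        norm_num
      simp only [Function.comp_apply]
      rw [hvk, hneed, pv_counter_two _ _ hv1 hv2]
      simp only [hFA]
      rw [if_pos hc2, PySem.Set.update_nil_left,
          PySem.Set.ofList_eq_self_of_nodup _ (PySem.Set.nodup_inter _ _ hv1)]
    · have hcf2 : d2.contains k = false := by simpa using hc2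
      have hk2 : k ∉ d2.keys := fun hh =>
        absurd ((PySem.Dict.contains_iff_mem_keys d2 k).mpr hh) (by simp [hcf2])
      have hf2 : d2.items.filter (fun p => p.1 == k) = [] :=
        pv_filter_key_none d2.items k hk2
      have hvk : vot.getD k PySem.Dict.empty = PySem.Dict.counter (d1.getD k []) := by
        rw [hvot k, hf1, hf2, PySem.Dict.counter_eq_foldl]
        simp
      have hneed : (((d1.keys ++ d2.keys).count k : Nat) : Int) = 1 := by
        rw [List.count_append, List.count_eq_one_of_mem hnd1 hk, List.count_eq_zero_of_not_mem hk2]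
        norm_num
      simp only [Function.comp_apply]
      rw [hvk, hneed, pv_counter_one _ hv1]
      simp only [hFA]
      rw [if_neg (by simp [hcf2]), PySem.Set.update_nil_left,
          PySem.Set.ofList_eq_self_of_nodup _ hv1]
  -- ===== second part: barcodes only in dict2 =====
  · refine List.map_congr_left (fun k hkf => ?_)
    have hk2 : k ∈ d2.keys := (List.mem_filter.mp hkf).1
    have hcf1 : d1.contains k = false := by
      have := (List.mem_filter.mp hkf).2
      rw [hcont k] at this
      simpa using this
    have hk1 : k ∉ d1.keys := fun hh =>
      absurd ((PySem.Dict.contains_iff_mem_keys d1 k).mpr hh) (by simp [hcf1])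
    have hc2 : d2.contains k = true := (PySem.Dict.contains_iff_mem_keys d2 k).mpr hk2
    have hm2 : (k, d2.getD k []) ∈ d2.items := pv_mem_items_of_contains d2 k [] hc2
    have hv2 : (d2.getD k []).Nodup := hval2 _ hm2
    have hf2 : d2.items.filter (fun p => p.1 == k) = [(k, d2.getD k [])] :=
      pv_filter_key_nodup d2.items k (d2.getD k []) hnd2' hm2
    have hf1 : d1.items.filter (fun p => p.1 == k) = [] :=
      pv_filter_key_none d1.items k hk1
    have hvk : vot.getD k PySem.Dict.empty = PySem.Dict.counter (d2.getD k []) := by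
      rw [hvot k, hf1, hf2, PySem.Dict.counter_eq_foldl]
      simp
    have hneed : (((d1.keys ++ d2.keys).count k : Nat) : Int) = 1 := by
      rw [List.count_append, List.count_eq_zero_of_not_mem hk1, List.count_eq_one_of_mem hnd2 hk2]
      norm_num
    simp only [Function.comp_apply]
    rw [hvk, hneed, pv_counter_one _ hv2]
    rw [PySem.Set.update_nil_left, PySem.Set.ofList_eq_self_of_nodup _ hv2]
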